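-- pv_equiv track=rewrite | github.com/eiei220101/WX-BRIEF-JCAB-for-PPL-CPL-IR | app.py | group_detailed_sigwx_rows_by_region
-- ===== SOURCE A (Python) =====
-- UI_REGION_GROUPS_DETAILED_SIGWX: list[dict] = [
--     {
--         "id": "tohoku_kanto",
--         "title": "東北・関東",
--         "figs": (
--             "Fig206",
--             "Fig204",
--             "Fig202",
--             "Fig205",
--             "Fig501",
--             "Fig203",
--             "Fig301",
--             "Fig302",
--         ),
--     },
-- ]
--
-- def group_detailed_sigwx_rows_by_region(
--     drows: list[dict],
-- ) -> list[tuple[str, list[dict]]]: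
--     """詳細版の行（fig_key）を地域枠に分類。"""
--     seen: set[str] = set()
--     blocks: list[tuple[str, list[dict]]] = []
--     for g in UI_REGION_GROUPS_DETAILED_SIGWX:
--         title = str(g.get("title") or "").strip() or "地域"
--         want = [str(x).strip() for x in (g.get("figs") or ()) if str(x).strip()]
--         if not want:
--             continue
--         order = {c: i for i, c in enumerate(want)}
--         sub = [d for d in drows if str(d.get("fig_key") or "").strip() in order]
--         sub.sort(
--             key=lambda d: order.get(str(d.get("fig_key") or "").strip(), 99)
--         )
--         for d in sub:
--             seen.add(str(d.get("fig_key") or "").strip())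
--         if sub:
--             blocks.append((title, sub))
--     other = [d for d in drows if str(d.get("fig_key") or "").strip() not in seen]
--     if other:
--         other.sort(key=lambda d: str(d.get("fig_key") or ""))
--         blocks.append(("その他", other))
--     return blocks
-- ===== SOURCE B (Python) =====
-- UI_REGION_GROUPS_DETAILED_SIGWX: list[dict] = [
--     {
--         "id": "tohoku_kanto",
--         "title": "東北・関東",
--         "figs": (
--             "Fig206",
--             "Fig204",
--             "Fig202",
--             "Fig205",
--             "Fig501",
--             "Fig203",
--             "Fig301",
--             "Fig302",
--         ),
--     },
-- ]
--
--
-- def group_detailed_sigwx_rows_by_region(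
--     drows: list[dict],
-- ) -> list[tuple[str, list[dict]]]:
--     """詳細版の行（fig_key）を地域枠に分類（図番号ごとのフィルタ連結方式）。"""
--
--     def key(d: dict) -> str:
--         return str(d.get("fig_key") or "").strip()
--
--     def walk(groups: list[dict], grouped: set[str]):
--         # recursive descent over the region groups; for each group the
--         # sub-list is the concatenation, in fig order, of the rows whose
--         # key equals that fig (no sort needed: within a fig the original
--         # row order is kept, and figs are emitted in the group's order).
--         if not groups:
--             return [], grouped
--         g = groups[0]
--         want = [str(x).strip() for x in (g.get("figs") or ()) if str(x).strip()]
--         if not want: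
--             return walk(groups[1:], grouped)
--         sub = [d for c in want for d in drows if key(d) == c]
--         tail, grouped = walk(groups[1:], grouped | set(want))
--         if not sub:
--             return tail, grouped
--         title = str(g.get("title") or "").strip() or "地域"
--         return [(title, sub)] + tail, grouped
--
--     blocks, grouped = walk(UI_REGION_GROUPS_DETAILED_SIGWX, set())
--     other = sorted(
--         (d for d in drows if key(d) not in grouped),
--         key=lambda d: str(d.get("fig_key") or ""),
--     )
--     if other:
--         blocks.append(("その他", other))
--     return blocks
-- ===== Notes on version B (the rewrite author's own statement) =====
-- stated objective: alternative
-- what changed: Replaces A's filter-then-stable-sort-by-order-index grouping (with a seen set accumulated from the sorted rows) by a recursive walk over the groups that builds each sub-list as a per-fig filter concatenation in the group's fig order (no sort, no order dict) and marks the group's whole fig set as grouped; the 'other' rows are then one sorted() over a direct membership filter.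
import Mathlib
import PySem

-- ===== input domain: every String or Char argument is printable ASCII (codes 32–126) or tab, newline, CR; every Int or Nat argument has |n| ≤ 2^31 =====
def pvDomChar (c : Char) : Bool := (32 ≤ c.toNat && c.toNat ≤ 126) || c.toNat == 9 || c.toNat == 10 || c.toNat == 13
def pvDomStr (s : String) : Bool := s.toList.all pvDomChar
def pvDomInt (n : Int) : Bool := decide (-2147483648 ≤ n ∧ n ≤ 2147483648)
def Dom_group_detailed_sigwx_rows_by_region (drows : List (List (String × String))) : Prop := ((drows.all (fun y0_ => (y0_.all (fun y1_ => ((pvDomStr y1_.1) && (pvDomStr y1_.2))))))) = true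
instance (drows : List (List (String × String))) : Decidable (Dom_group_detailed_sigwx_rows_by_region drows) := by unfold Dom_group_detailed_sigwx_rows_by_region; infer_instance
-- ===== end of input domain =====

-- B replaces A's filter + stable sort by order index (and the seen set built from the sorted rows)
-- with a recursive walk over the groups that emits each sub-list as a per-fig filter concatenation
-- in the group's fig order; return values proved equal (alternative algorithm, no speed claim).

-- ===== PORT A =====
-- the module constant UI_REGION_GROUPS_DETAILED_SIGWX, as (title, figs) pairs (only fields A reads)
def pvGroupsA : List (String × List String) :=
  [("東北・関東", ["Fig206", "Fig204", "Fig202", "Fig205", "Fig501", "Fig203", "Fig301", "Fig302"])]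

-- str(d.get("fig_key") or "").strip()
def pvKeyA (d : List (String × String)) : String :=
  PySem.Str.strip (((PySem.Dict.mk d).get? "fig_key").getD "")

-- one iteration of A's `for g in UI_REGION_GROUPS_DETAILED_SIGWX` loop; state = (seen, blocks)
def pvStepA (drows : List (List (String × String)))
    (acc : PySem.Set String × List (String × List (List (String × String))))
    (g : String × List String) :
    PySem.Set String × List (String × List (List (String × String))) :=
  let title := if PySem.Str.strip g.1 = "" then "地域" else PySem.Str.strip g.1
  let want := (g.2.map PySem.Str.strip).filter (fun s => !(s == ""))
  if want = [] then acc
  else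
    let order := (PySem.List.enumerate want).foldl (fun d p => d.insert p.2 p.1) PySem.Dict.empty
    let sub := drows.filter (fun d => order.contains (pvKeyA d))
    let sub := PySem.List.sorted sub (fun d => order.getD (pvKeyA d) 99)
    let seen := sub.foldl (fun s d => PySem.Set.add s (pvKeyA d)) acc.1
    (seen, if sub = [] then acc.2 else acc.2 ++ [(title, sub)])

def group_detailed_sigwx_rows_by_region (drows : List (List (String × String))) :
    List (String × (List (List (String × String)))) :=
  let st := pvGroupsA.foldl (pvStepA drows) (PySem.Set.empty, [])
  let other := drows.filter (fun d => !(st.1.contains (pvKeyA d)))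
  if other = [] then st.2
  else st.2 ++ [("その他", PySem.List.sorted other (fun d => ((PySem.Dict.mk d).get? "fig_key").getD ""))]

-- ===== PORT B =====
def pvGroupsB : List (String × List String) :=
  [("東北・関東", ["Fig206", "Fig204", "Fig202", "Fig205", "Fig501", "Fig203", "Fig301", "Fig302"])]

-- the local helper key(d)
def pvKeyB (d : List (String × String)) : String :=
  PySem.Str.strip (((PySem.Dict.mk d).get? "fig_key").getD "")

-- the local recursive helper walk(groups, grouped)
def pvWalkB (drows : List (List (String × String))) :
    List (String × List String) → PySem.Set String →
    List (String × List (List (String × String))) × PySem.Set String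
  | [], grouped => ([], grouped)
  | g :: rest, grouped =>
    let want := (g.2.map PySem.Str.strip).filter (fun s => !(s == ""))
    if want = [] then pvWalkB drows rest grouped
    else
      let sub := want.flatMap (fun c => drows.filter (fun d => pvKeyB d == c))
      let r := pvWalkB drows rest (PySem.Set.update grouped want)
      if sub = [] then r
      else
        let title := if PySem.Str.strip g.1 = "" then "地域" else PySem.Str.strip g.1
        ((title, sub) :: r.1, r.2)

def group_detailed_sigwx_rows_by_region_alt (drows : List (List (String × String))) :
    List (String × (List (List (String × String)))) :=
  let st := pvWalkB drows pvGroupsB PySem.Set.empty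
  let other := PySem.List.sorted (drows.filter (fun d => !(st.2.contains (pvKeyB d))))
      (fun d => ((PySem.Dict.mk d).get? "fig_key").getD "")
  if other = [] then st.1 else st.1 ++ [("その他", other)]

-- ===== PRECONDITION & SPEC =====
def Spec_group_detailed_sigwx_rows_by_region (drows : List (List (String × String))) (out : List (String × (List (List (String × String))))) : Prop := out = group_detailed_sigwx_rows_by_region_alt drows
instance (drows : List (List (String × String))) (out : List (String × (List (List (String × String))))) : Decidable (Spec_group_detailed_sigwx_rows_by_region drows out) := by unfold Spec_group_detailed_sigwx_rows_by_region; infer_instance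

-- ===== CLAIM (what is proved, stated in full; the proofs are below) =====
def Claim_equal_group_detailed_sigwx_rows_by_region : Prop := ∀ (drows : List (List (String × String))), Dom_group_detailed_sigwx_rows_by_region drows → Spec_group_detailed_sigwx_rows_by_region drows (group_detailed_sigwx_rows_by_region drows)


-- ===== LEMMAS AND PROOFS =====

-- proof-side names for the closed values the single group produces, and for both programs' pieces
def pvW : List String := ["Fig206", "Fig204", "Fig202", "Fig205", "Fig501", "Fig203", "Fig301", "Fig302"]
def pvOrder : PySem.Dict String Int :=
  PySem.Dict.mk [("Fig206", 0), ("Fig204", 1), ("Fig202", 2), ("Fig205", 3), ("Fig501", 4), ("Fig203", 5), ("Fig301", 6), ("Fig302", 7)]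
def pvSortA (drows : List (List (String × String))) : List (List (String × String)) :=
  PySem.List.sorted (drows.filter (fun d => pvOrder.contains (pvKeyA d))) (fun d => pvOrder.getD (pvKeyA d) 99)
def pvSeenA (drows : List (List (String × String))) : PySem.Set String :=
  (pvSortA drows).foldl (fun s d => PySem.Set.add s (pvKeyA d)) PySem.Set.empty
def pvSubB (drows : List (List (String × String))) : List (List (String × String)) :=
  pvW.flatMap (fun c => drows.filter (fun d => pvKeyB d == c))
theorem pvContainsW (s : String) : pvOrder.contains s = true ↔ s ∈ pvW := by
  rw [PySem.Dict.contains_eq_decide_mem_keys]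
  simp [pvOrder, pvW, PySem.Dict.keys]

-- stable insertion into an ordered concatenation of key buckets lands at the end of its bucket
theorem pvInsertBy_pass {α : Type} (before : α → α → Bool) (x : α) (l t : List α)
    (h : ∀ y ∈ l, before x y = false) :
    PySem.List.insertBy before x (l ++ t) = l ++ PySem.List.insertBy before x t := by
  induction l with
  | nil => rfl
  | cons y l ih =>
    simp only [List.cons_append, PySem.List.insertBy, h y (by simp)]
    simp only [Bool.false_eq_true, if_false, List.cons_inj_right]
    exact ih (fun z hz => h z (by simp [hz]))

theorem pvInsertBy_head {α : Type} (before : α → α → Bool) (x : α) (t : List α)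
    (h : ∀ y ∈ t, before x y = true) :
    PySem.List.insertBy before x t = x :: t := by
  cases t with
  | nil => rfl
  | cons y t => simp [PySem.List.insertBy, h y (by simp)]

theorem pvInsertBy_buckets {α : Type} (kf : α → String) (ord : String → Int)
    (cs : List String) (F : String → List α) (x : α)
    (hinj : cs.Pairwise (fun a b => ord a < ord b))
    (hF : ∀ c ∈ cs, ∀ y ∈ F c, kf y = c)
    (hx : kf x ∈ cs) :
    PySem.List.insertBy (fun a b => decide (ord (kf a) < ord (kf b))) x (cs.flatMap F)
      = cs.flatMap (fun c => F c ++ if kf x == c then [x] else []) := by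
  induction cs with
  | nil => simp at hx
  | cons c cs ih =>
    have hc : ∀ c' ∈ cs, ord c < ord c' := (List.pairwise_cons.mp hinj).1
    have hpairs : cs.Pairwise (fun a b => ord a < ord b) := (List.pairwise_cons.mp hinj).2
    simp only [List.flatMap_cons]
    by_cases hxc : kf x = c
    · rw [pvInsertBy_pass _ _ _ _ (fun y hy => by
        have : kf y = c := hF c (by simp) y hy
        simp [this, hxc])]
      rw [pvInsertBy_head _ _ _ (fun y hy => by
        obtain ⟨c', hc', hy'⟩ := List.mem_flatMap.mp hy
        have : kf y = c' := hF c' (by simp [hc']) y hy'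
        simp [this, hxc, hc c' hc'])]
      have : cs.flatMap (fun c' => F c' ++ if kf x == c' then [x] else []) = cs.flatMap F := by
        apply List.flatMap_congr
        intro c' hc'
        have : kf x ≠ c' := by
          intro he; exact absurd (hc c' hc') (by rw [← he, hxc]; omega)
        simp [this]
      rw [this, hxc]
      simp
    · have hx' : kf x ∈ cs := by rcases List.mem_cons.mp hx with h|h; exact absurd h hxc; exact h
      rw [pvInsertBy_pass _ _ _ _ (fun y hy => by
        have hyc : kf y = c := hF c (by simp) y hy
        have : ord c < ord (kf x) := hc _ hx'
        simp [hyc]; omega)]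
      rw [ih hpairs (fun c' h1 y h2 => hF c' (by simp [h1]) y h2) hx']
      have hne : (kf x == c) = false := by simp [hxc]
      simp [hne]

-- Python's stable sort by a strictly increasing order index is bucketed emission
theorem pvSorted_buckets {α : Type} (kf : α → String) (ord : String → Int)
    (cs : List String) (xs : List α)
    (hinj : cs.Pairwise (fun a b => ord a < ord b))
    (hmem : ∀ x ∈ xs, kf x ∈ cs) :
    PySem.List.sorted xs (fun x => ord (kf x))
      = cs.flatMap (fun c => xs.filter (fun y => kf y == c)) := by
  rw [PySem.List.sorted_eq_foldl_insertBy]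
  induction xs using List.reverseRecOn with
  | nil => simp
  | append_singleton xs x ih =>
    rw [List.foldl_append, List.foldl_cons, List.foldl_nil]
    rw [ih (fun y hy => hmem y (by simp [hy]))]
    rw [pvInsertBy_buckets kf ord cs _ x hinj
      (fun c hc y hy => by simpa using (List.mem_filter.mp hy).2)
      (hmem x (by simp))]
    apply List.flatMap_congr
    intro c hc
    rw [List.filter_append]
    rw [List.filter_singleton]
    by_cases h : kf x = c
    · rw [show (kf x == c) = true by simp [h]]; rfl
    · rw [show (kf x == c) = false by simp [h]]; rfl

-- A's port with the single group unrolled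
theorem pvA_eq (drows : List (List (String × String))) :
    group_detailed_sigwx_rows_by_region drows =
      (if drows.filter (fun d => !((pvSeenA drows).contains (pvKeyA d))) = []
       then (if pvSortA drows = [] then [] else [("東北・関東", pvSortA drows)])
       else (if pvSortA drows = [] then [] else [("東北・関東", pvSortA drows)])
            ++ [("その他", PySem.List.sorted (drows.filter (fun d => !((pvSeenA drows).contains (pvKeyA d)))) (fun d => ((PySem.Dict.mk d).get? "fig_key").getD ""))]) := by
  have hw : ((["Fig206", "Fig204", "Fig202", "Fig205", "Fig501", "Fig203", "Fig301", "Fig302"].map PySem.Str.strip).filter (fun s => !(s == ""))) = pvW := by decide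
  have hord : (PySem.List.enumerate pvW).foldl (fun d p => d.insert p.2 p.1) PySem.Dict.empty = pvOrder := by rfl
  simp only [group_detailed_sigwx_rows_by_region, pvGroupsA, List.foldl_cons, List.foldl_nil, pvStepA, hw, hord]
  rw [if_neg (by decide : ¬ (pvW = []))]
  rw [show (if PySem.Str.strip "東北・関東" = "" then "地域" else PySem.Str.strip "東北・関東") = "東北・関東" by decide]
  rfl

-- B's port with the single group unrolled
theorem pvB_eq (drows : List (List (String × String))) :
    group_detailed_sigwx_rows_by_region_alt drows =
      (if PySem.List.sorted (drows.filter (fun d => !((PySem.Set.update (PySem.Set.empty : PySem.Set String) pvW).contains (pvKeyB d)))) (fun d => ((PySem.Dict.mk d).get? "fig_key").getD "") = []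
       then (if pvSubB drows = [] then [] else [("東北・関東", pvSubB drows)])
       else (if pvSubB drows = [] then [] else [("東北・関東", pvSubB drows)])
            ++ [("その他", PySem.List.sorted (drows.filter (fun d => !((PySem.Set.update (PySem.Set.empty : PySem.Set String) pvW).contains (pvKeyB d)))) (fun d => ((PySem.Dict.mk d).get? "fig_key").getD ""))]) := by
  have hw : ((["Fig206", "Fig204", "Fig202", "Fig205", "Fig501", "Fig203", "Fig301", "Fig302"].map PySem.Str.strip).filter (fun s => !(s == ""))) = pvW := by decide
  simp only [group_detailed_sigwx_rows_by_region_alt, pvGroupsB, pvWalkB, hw]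
  rw [if_neg (by decide : ¬ (pvW = []))]
  rw [show (if PySem.Str.strip "東北・関東" = "" then "地域" else PySem.Str.strip "東北・関東") = "東北・関東" by decide]
  by_cases hsub : pvSubB drows = []
  · simp only [pvSubB] at hsub
    simp only [hsub, pvSubB]
    split <;> rfl
  · simp only [pvSubB] at hsub ⊢
    rw [if_neg hsub]
    rw [if_neg hsub]

-- the two sub-lists agree
theorem pvSub_eq (drows : List (List (String × String))) : pvSortA drows = pvSubB drows := by
  unfold pvSortA pvSubB
  rw [pvSorted_buckets pvKeyA (fun s => pvOrder.getD s 99) pvW _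
    (by decide)
    (fun x hx => (pvContainsW _).mp (by simpa using (List.mem_filter.mp hx).2))]
  apply List.flatMap_congr
  intro c hc
  rw [List.filter_filter]
  apply List.filter_congr
  intro d _
  symm
  show (pvKeyB d == c) = ((pvKeyA d == c) && pvOrder.contains (pvKeyA d))
  by_cases h : pvKeyA d = c
  · have hco : pvOrder.contains (pvKeyA d) = true := (pvContainsW _).mpr (h ▸ hc)
    have hB : pvKeyB d = c := h
    rw [show (pvKeyB d == c) = true by simp [hB], show (pvKeyA d == c) = true by simp [h], hco]
    rfl
  · have hB : ¬ (pvKeyB d = c) := h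
    rw [show (pvKeyB d == c) = false by simp [hB], show (pvKeyA d == c) = false by simp [h]]
    simp

-- membership in A's seen set is membership in the group's fig list
theorem pvSeen_eq (drows : List (List (String × String))) (d : List (String × String)) (hd : d ∈ drows) :
    (!((pvSeenA drows).contains (pvKeyA d)))
      = (!((PySem.Set.update (PySem.Set.empty : PySem.Set String) pvW).contains (pvKeyB d))) := by
  have hupd : (PySem.Set.update (PySem.Set.empty : PySem.Set String) pvW) = pvW := by decide
  rw [hupd]
  have : (pvSeenA drows).contains (pvKeyA d) = PySem.Set.contains pvW (pvKeyB d) := by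
    rw [Bool.eq_iff_iff, PySem.Set.contains_iff, PySem.Set.contains_iff]
    unfold pvSeenA
    rw [PySem.Set.mem_foldl_add]
    constructor
    · rintro (h | ⟨b, hb, hkb⟩)
      · simp [PySem.Set.empty] at h
      · unfold pvSortA at hb
        have hbf := (PySem.List.mem_sorted _ _ _ _).mp hb
        have h2 : pvOrder.contains (pvKeyA b) = true := by simpa using (List.mem_filter.mp hbf).2
        show pvKeyA d ∈ pvW
        exact hkb ▸ (pvContainsW _).mp h2
    · intro h
      right
      refine ⟨d, ?_, rfl⟩
      unfold pvSortA
      rw [PySem.List.mem_sorted]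
      refine List.mem_filter.mpr ⟨hd, by simpa using (pvContainsW (pvKeyA d)).mpr h⟩
  rw [this]

-- ===== VERDICT (by name: the statement is the Claim_ definition above) =====
theorem group_detailed_sigwx_rows_by_region_spec : Claim_equal_group_detailed_sigwx_rows_by_region := by
  intro drows _
  unfold Spec_group_detailed_sigwx_rows_by_region
  rw [pvA_eq, pvB_eq]
  rw [List.filter_congr (fun d hd => pvSeen_eq drows d hd)]
  rw [pvSub_eq]
  by_cases h : drows.filter (fun d => !((PySem.Set.update (PySem.Set.empty : PySem.Set String) pvW).contains (pvKeyB d))) = []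
  · rw [h, if_pos rfl, if_pos (show PySem.List.sorted ([] : List (List (String × String))) (fun d => ((PySem.Dict.mk d).get? "fig_key").getD "") = [] from rfl)]
  · have h' : ¬ (PySem.List.sorted (drows.filter (fun d => !((PySem.Set.update (PySem.Set.empty : PySem.Set String) pvW).contains (pvKeyB d)))) (fun d => ((PySem.Dict.mk d).get? "fig_key").getD "") = []) := by
      rw [PySem.List.sorted_eq_nil_iff]; exact h
    rw [if_neg h, if_neg h']
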